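-- pv_equiv track=rewrite | github.com/13aek/Algorithm | 프로그래머스/2/42626. 더 맵게/더 맵게.py | solution
-- ===== SOURCE A (Python) =====
-- from heapq import heappush, heappop, heapify
--
-- def solution(scoville, K):
--     answer = 0
--
--     def scoville_score(k1, k2):
--         return k1 + (k2 * 2)
--
--     heapify(scoville)
--
--     while scoville:
--         first = heappop(scoville)
--
--         if first >= K:
--             break
--
--         if not scoville:
--             answer = -1
--             break
--
--         second = heappop(scoville)
--
--         mixed = scoville_score(first, second)
--         answer += 1
--         heappush(scoville, mixed)
--
--     return answer
-- ===== SOURCE B (Python) =====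
-- from collections import deque
--
--
-- def solution(scoville, K):
--     # Two-queue Huffman-style merging: sort once, then every step is O(1).
--     # q1 holds the (sorted) original values, q2 the mixed values in creation
--     # order; the overall minimum is always at one of the two fronts, so no
--     # heap or binary insertion is ever needed.
--     # Return value only: unlike A, this does not mutate the argument.
--     answer = 0
--     q1 = deque(sorted(scoville))
--     q2 = deque()
--
--     def pop_min():
--         if not q2 or (q1 and q1[0] <= q2[0]):
--             return q1.popleft()
--         return q2.popleft()
--
--     while q1 or q2:
--         first = pop_min()
--         if first >= K:
--             break
--         if not q1 and not q2:
--             answer = -1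
--             break
--         second = pop_min()
--         q2.append(first + 2 * second)
--         answer += 1
--     return answer
-- ===== Notes on version B (the rewrite author's own statement) =====
-- stated objective: faster
-- what changed: Replaces the binary heap with the two-queue merging technique: sort once, keep original values in one FIFO queue and mixed values in a second FIFO queue; the global minimum is always one of the two fronts (the second queue provably stays sorted), so every merge step is O(1) front-pops instead of O(log n) heap sifts.
import Mathlib
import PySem

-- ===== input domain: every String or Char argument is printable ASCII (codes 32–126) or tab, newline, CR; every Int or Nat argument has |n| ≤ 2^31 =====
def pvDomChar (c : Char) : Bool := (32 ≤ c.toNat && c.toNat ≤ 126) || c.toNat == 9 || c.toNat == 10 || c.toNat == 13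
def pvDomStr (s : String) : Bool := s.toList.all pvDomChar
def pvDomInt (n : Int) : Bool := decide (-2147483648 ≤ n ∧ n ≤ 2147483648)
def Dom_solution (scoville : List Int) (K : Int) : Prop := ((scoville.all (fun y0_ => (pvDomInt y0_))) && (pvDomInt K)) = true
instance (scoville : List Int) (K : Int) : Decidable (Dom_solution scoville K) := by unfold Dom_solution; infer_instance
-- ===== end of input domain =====

-- B replaces A's heap with two-queue (Huffman-style) merging: sort once, then every step pops
-- from the fronts of two FIFO queues. Return value only: A mutates its argument, B does not.

-- ===== PORT A =====
-- heappop modeled by its observable effect on a list of Ints: it returns the minimum value and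
-- leaves the remaining multiset (exact: with Int elements, equal values are indistinguishable, so
-- the popped value and the remaining multiset determine every later pop, hence A's return value;
-- heapify only reorders the list, which this model ignores for the same reason).
def pyHeappop (l : List Int) : Option (Int × List Int) :=
  match PySem.List.min? l (fun x => x) with
  | none => none
  | some m => some (m, l.erase m)

def scovilleScore (k1 k2 : Int) : Int := k1 + (k2 * 2)

-- A's while-loop; each iteration removes two elements and adds one, so fuel = initial length
-- is never exhausted before the list is.
def solutionLoop : Nat → List Int → Int → Int → Int
  | 0, _, _, answer => answer
  | fuel+1, scov, K, answer =>
    match pyHeappop scov with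
    | none => answer
    | some (first, rest) =>
      if first ≥ K then answer
      else
        match pyHeappop rest with
        | none => -1
        | some (second, rest2) =>
          solutionLoop fuel (rest2 ++ [scovilleScore first second]) K (answer + 1)

def solution (scoville : List Int) (K : Int) : Int :=
  solutionLoop scoville.length scoville K 0

-- ===== PORT B =====
-- Source B's pop_min on the pair of deques: the front of q1 when q2 is empty or q1 is nonempty
-- with q1[0] <= q2[0], otherwise the front of q2 (deque.popleft = head removal).
def popMin (q1 q2 : List Int) : Option (Int × List Int × List Int) :=
  match q1, q2 with
  | [], [] => none
  | a :: t, [] => some (a, t, [])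
  | [], b :: u => some (b, [], u)
  | a :: t, b :: u => if a ≤ b then some (a, t, b :: u) else some (b, a :: t, u)

-- B's while-loop over the two queues; as in A, fuel = initial length suffices.
def solutionAltLoop : Nat → List Int → List Int → Int → Int → Int
  | 0, _, _, _, answer => answer
  | fuel+1, q1, q2, K, answer =>
    match popMin q1 q2 with
    | none => answer
    | some (first, q1', q2') =>
      if first ≥ K then answer
      else
        match popMin q1' q2' with
        | none => -1
        | some (second, q1'', q2'') =>
          solutionAltLoop fuel q1'' (q2'' ++ [first + 2 * second]) K (answer + 1)

def solution_alt (scoville : List Int) (K : Int) : Int :=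
  solutionAltLoop scoville.length (PySem.List.sorted scoville (fun x => x) false) [] K 0

-- ===== PRECONDITION & SPEC =====
def Spec_solution (scoville : List Int) (K : Int) (out : Int) : Prop := out = solution_alt scoville K
instance (scoville : List Int) (K : Int) (out : Int) : Decidable (Spec_solution scoville K out) := by unfold Spec_solution; infer_instance

-- ===== CLAIM (what is proved, stated in full; the proofs are below) =====
def Claim_equal_solution : Prop := ∀ (scoville : List Int) (K : Int), Dom_solution scoville K → Spec_solution scoville K (solution scoville K)

-- ===== LEMMAS AND PROOFS =====

-- pyHeappop on a nonempty list returns the minimum value and erases (one occurrence of) it.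
theorem pyHeappop_spec (l : List Int) (hne : l ≠ []) :
    ∃ m, pyHeappop l = some (m, l.erase m) ∧ m ∈ l ∧ ∀ y ∈ l, m ≤ y := by
  cases hm : PySem.List.min? l (fun x => x) with
  | none => exact absurd ((PySem.List.min?_eq_none_iff l (fun x => x)).mp hm) hne
  | some m =>
    refine ⟨m, by simp [pyHeappop, hm], PySem.List.min?_mem hm, ?_⟩
    intro y hy; exact PySem.List.min?_isMin hm y hy

-- "chain S q2": every element y of q2 satisfies y ≤ x + 2*z for all x, z drawn from S together
-- with the elements of q2 preceding y (the pool elements present when the mix y was created).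
def chain (S : List Int) : List Int → Prop
  | [] => True
  | y :: ys => (∀ x ∈ S, ∀ z ∈ S, y ≤ x + 2 * z) ∧ chain (S ++ [y]) ys

theorem chain_mono (S S' l : List Int) (hss : ∀ a ∈ S', a ∈ S) (h : chain S l) :
    chain S' l := by
  induction l generalizing S S' with
  | nil => trivial
  | cons y ys ih =>
    obtain ⟨hy, hys⟩ := h
    refine ⟨fun x hx z hz => hy x (hss x hx) z (hss z hz), ih (S ++ [y]) (S' ++ [y]) ?_ hys⟩
    intro a ha
    rcases List.mem_append.mp ha with ha | ha
    · exact List.mem_append.mpr (Or.inl (hss a ha))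
    · exact List.mem_append.mpr (Or.inr ha)

theorem chain_all (S l : List Int) (h : chain S l) :
    ∀ y ∈ l, ∀ x ∈ S, ∀ z ∈ S, y ≤ x + 2 * z := by
  induction l generalizing S with
  | nil => intro y hy; cases hy
  | cons y ys ih =>
    obtain ⟨hy, hys⟩ := h
    intro w hw x hx z hz
    rcases List.mem_cons.mp hw with hw | hw
    · subst hw; exact hy x hx z hz
    · exact ih (S ++ [y]) hys w hw x (List.mem_append.mpr (Or.inl hx)) z (List.mem_append.mpr (Or.inl hz))

theorem chain_snoc (S l : List Int) (m : Int) (h : chain S l)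
    (hm : ∀ x ∈ S ++ l, ∀ z ∈ S ++ l, m ≤ x + 2 * z) : chain S (l ++ [m]) := by
  induction l generalizing S with
  | nil =>
    exact ⟨fun x hx z hz => hm x (by simpa using hx) z (by simpa using hz), trivial⟩
  | cons y ys ih =>
    obtain ⟨hy, hys⟩ := h
    refine ⟨hy, ih (S ++ [y]) hys ?_⟩
    intro x hx z hz
    exact hm x (by simpa [List.mem_append, or_assoc] using hx)
         z (by simpa [List.mem_append, or_assoc] using hz)

theorem popMin_none (q1 q2 : List Int) (h : popMin q1 q2 = none) : q1 = [] ∧ q2 = [] := by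
  cases q1 with
  | nil => cases q2 with
    | nil => exact ⟨rfl, rfl⟩
    | cons b u => simp [popMin] at h
  | cons a t => cases q2 with
    | nil => simp [popMin] at h
    | cons b u => by_cases hab : a ≤ b <;> simp [popMin, hab] at h

-- popMin on sorted queues is exactly pyHeappop of the concatenated pool.
theorem popMin_spec (q1 q2 : List Int) (h1 : q1.Pairwise (· ≤ ·)) (h2 : q2.Pairwise (· ≤ ·))
    (m : Int) (r1 r2 : List Int) (h : popMin q1 q2 = some (m, r1, r2)) :
    pyHeappop (q1 ++ q2) = some (m, r1 ++ r2) ∧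
    (∀ y ∈ r1 ++ r2, m ≤ y) ∧
    r1.Pairwise (· ≤ ·) ∧ r2.Pairwise (· ≤ ·) := by
  have key : ∀ (l : List Int), l = q1 ++ q2 → (∀ y ∈ l, m ≤ y) → l.erase m = r1 ++ r2 →
      m ∈ l → pyHeappop l = some (m, r1 ++ r2) ∧ (∀ y ∈ r1 ++ r2, m ≤ y) := by
    intro l hl hmin her hmem
    obtain ⟨m', hpop, hmem', hmin'⟩ := pyHeappop_spec l (by
      intro hnil; rw [hnil] at hmem; cases hmem)
    have heq : m = m' := le_antisymm (hmin m' hmem') (hmin' m hmem)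
    subst heq
    refine ⟨by rw [hpop, her], ?_⟩
    intro y hy
    exact hmin y (by
      have hsub : l.erase m ⊆ l := List.erase_subset
      rw [her] at hsub; exact hsub hy)
  cases q1 with
  | nil =>
    cases q2 with
    | nil => simp [popMin] at h
    | cons b u =>
      simp only [popMin, Option.some.injEq, Prod.mk.injEq] at h
      obtain ⟨rfl, rfl, rfl⟩ := h
      have hmin : ∀ y ∈ ([] : List Int) ++ b :: u, b ≤ y := by
        intro y hy
        rcases List.mem_cons.mp (by simpa using hy) with hy | hy
        · omega
        · exact (List.pairwise_cons.mp h2).1 y hy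
      obtain ⟨hp, hb⟩ := key _ rfl hmin (by simp [List.erase_cons_head]) (by simp)
      exact ⟨hp, hb, by simp, (List.pairwise_cons.mp h2).2⟩
  | cons a t =>
    cases q2 with
    | nil =>
      simp only [popMin, Option.some.injEq, Prod.mk.injEq] at h
      obtain ⟨rfl, rfl, rfl⟩ := h
      have hmin : ∀ y ∈ (a :: t) ++ ([] : List Int), a ≤ y := by
        intro y hy
        rcases List.mem_cons.mp (by simpa using hy) with hy | hy
        · omega
        · exact (List.pairwise_cons.mp h1).1 y hy
      obtain ⟨hp, hb⟩ := key _ rfl hmin (by simp [List.erase_cons_head]) (by simp)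
      exact ⟨hp, hb, (List.pairwise_cons.mp h1).2, by simp⟩
    | cons b u =>
      by_cases hab : a ≤ b
      · simp only [popMin, if_pos hab, Option.some.injEq, Prod.mk.injEq] at h
        obtain ⟨rfl, rfl, rfl⟩ := h
        have hmin : ∀ y ∈ (a :: t) ++ b :: u, a ≤ y := by
          intro y hy
          rcases List.mem_append.mp hy with hy | hy
          · rcases List.mem_cons.mp hy with hy | hy
            · omega
            · exact (List.pairwise_cons.mp h1).1 y hy
          · rcases List.mem_cons.mp hy with hy | hy
            · omega
            · exact le_trans hab ((List.pairwise_cons.mp h2).1 y hy)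
        obtain ⟨hp, hb⟩ := key _ rfl hmin (by simp [List.erase_cons_head]) (by simp)
        exact ⟨hp, hb, (List.pairwise_cons.mp h1).2, h2⟩
      · simp only [popMin, if_neg hab, Option.some.injEq, Prod.mk.injEq] at h
        obtain ⟨rfl, rfl, rfl⟩ := h
        have hq1 : ∀ y ∈ (a :: t), a ≤ y := by
          intro y hy
          rcases List.mem_cons.mp hy with hy | hy
          · omega
          · exact (List.pairwise_cons.mp h1).1 y hy
        have hmin : ∀ y ∈ (a :: t) ++ b :: u, b ≤ y := by
          intro y hy
          rcases List.mem_append.mp hy with hy | hy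
          · have := hq1 y hy; omega
          · rcases List.mem_cons.mp hy with hy | hy
            · omega
            · exact (List.pairwise_cons.mp h2).1 y hy
        have her : ((a :: t) ++ b :: u).erase b = (a :: t) ++ u := by
          rw [List.erase_append_right]
          · simp [List.erase_cons_head]
          · intro hmem1
            have := hq1 b hmem1; omega
        obtain ⟨hp, hb⟩ := key _ rfl hmin her (by simp)
        exact ⟨hp, hb, h1, (List.pairwise_cons.mp h2).2⟩

-- After popping the two smallest, the mix f + 2*s dominates every surviving mixed value, and
-- the chain invariant carries over to the surviving queues.
theorem pop2_chain (q1 q2 : List Int) (hc : chain q1 q2)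
    (f : Int) (r1 r2 : List Int) (hp : popMin q1 q2 = some (f, r1, r2))
    (s : Int) (t1 t2 : List Int) (hp2 : popMin r1 r2 = some (s, t1, t2)) :
    chain t1 t2 ∧ ∀ y ∈ t2, y ≤ f + 2 * s := by
  cases q1 with
  | nil =>
    cases q2 with
    | nil => simp [popMin] at hp
    | cons b u =>
      simp only [popMin, Option.some.injEq, Prod.mk.injEq] at hp
      obtain ⟨rfl, rfl, rfl⟩ := hp
      obtain ⟨_, huch⟩ := hc
      cases u with
      | nil => simp [popMin] at hp2
      | cons c v =>
        simp only [popMin, Option.some.injEq, Prod.mk.injEq] at hp2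
        obtain ⟨rfl, rfl, rfl⟩ := hp2
        obtain ⟨_, hvch⟩ := huch
        refine ⟨chain_mono _ _ _ (by intro x hx; cases hx) hvch, ?_⟩
        intro y hy
        exact chain_all _ _ hvch y hy b (by simp) c (by simp)
  | cons a t =>
    cases q2 with
    | nil =>
      simp only [popMin, Option.some.injEq, Prod.mk.injEq] at hp
      obtain ⟨rfl, rfl, rfl⟩ := hp
      cases t with
      | nil => simp [popMin] at hp2
      | cons c v =>
        simp only [popMin, Option.some.injEq, Prod.mk.injEq] at hp2
        obtain ⟨rfl, rfl, rfl⟩ := hp2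
        exact ⟨trivial, by intro y hy; cases hy⟩
    | cons b u =>
      by_cases hab : a ≤ b
      · simp only [popMin, if_pos hab, Option.some.injEq, Prod.mk.injEq] at hp
        obtain ⟨rfl, rfl, rfl⟩ := hp
        cases t with
        | nil =>
          simp only [popMin, Option.some.injEq, Prod.mk.injEq] at hp2
          obtain ⟨rfl, rfl, rfl⟩ := hp2
          obtain ⟨_, huch⟩ := hc
          refine ⟨chain_mono _ _ _ (by intro x hx; cases hx) huch, ?_⟩
          intro y hy
          exact chain_all _ _ huch y hy a (by simp) b (by simp)
        | cons c w =>
          by_cases hcb : c ≤ b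
          · simp only [popMin, if_pos hcb, Option.some.injEq, Prod.mk.injEq] at hp2
            obtain ⟨rfl, rfl, rfl⟩ := hp2
            refine ⟨chain_mono _ _ _ (by intro x hx; simp [List.mem_cons] at hx ⊢; tauto) hc, ?_⟩
            intro y hy
            exact chain_all _ _ hc y hy a (by simp) c (by simp)
          · simp only [popMin, if_neg hcb, Option.some.injEq, Prod.mk.injEq] at hp2
            obtain ⟨rfl, rfl, rfl⟩ := hp2
            obtain ⟨_, huch⟩ := hc
            refine ⟨chain_mono _ _ _ (by intro x hx; simp [List.mem_cons] at hx ⊢; tauto) huch, ?_⟩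
            intro y hy
            exact chain_all _ _ huch y hy a (by simp) b (by simp)
      · simp only [popMin, if_neg hab, Option.some.injEq, Prod.mk.injEq] at hp
        obtain ⟨rfl, rfl, rfl⟩ := hp
        obtain ⟨_, huch⟩ := hc
        cases u with
        | nil =>
          simp only [popMin, Option.some.injEq, Prod.mk.injEq] at hp2
          obtain ⟨rfl, rfl, rfl⟩ := hp2
          exact ⟨trivial, by intro y hy; cases hy⟩
        | cons c v =>
          by_cases hac : a ≤ c
          · simp only [popMin, if_pos hac, Option.some.injEq, Prod.mk.injEq] at hp2
            obtain ⟨rfl, rfl, rfl⟩ := hp2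
            refine ⟨chain_mono _ _ _ (by intro x hx; simp [List.mem_cons] at hx ⊢; tauto) huch, ?_⟩
            intro y hy
            exact chain_all _ _ huch y hy b (by simp) a (by simp)
          · simp only [popMin, if_neg hac, Option.some.injEq, Prod.mk.injEq] at hp2
            obtain ⟨rfl, rfl, rfl⟩ := hp2
            obtain ⟨_, hvch⟩ := huch
            refine ⟨chain_mono _ _ _ (by intro x hx; simp [List.mem_cons] at hx ⊢; tauto) hvch, ?_⟩
            intro y hy
            exact chain_all _ _ hvch y hy b (by simp) c (by simp)

-- The central simulation: on sorted queues satisfying the chain invariant, B's two-queue loop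
-- computes exactly A's heap loop on the concatenated pool.
theorem altLoop_eq_loop (fuel : Nat) (q1 q2 : List Int) (K ans : Int)
    (h1 : q1.Pairwise (· ≤ ·)) (h2 : q2.Pairwise (· ≤ ·)) (hc : chain q1 q2) :
    solutionAltLoop fuel q1 q2 K ans = solutionLoop fuel (q1 ++ q2) K ans := by
  induction fuel generalizing q1 q2 ans with
  | zero => rfl
  | succ fuel ih =>
    simp only [solutionAltLoop, solutionLoop]
    cases hp : popMin q1 q2 with
    | none =>
      obtain ⟨e1, e2⟩ := popMin_none q1 q2 hp
      subst e1; subst e2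
      simp [pyHeappop, PySem.List.min?]
    | some v =>
      obtain ⟨f, r1, r2⟩ := v
      obtain ⟨hpopA, hfmin, hr1, hr2⟩ := popMin_spec q1 q2 h1 h2 f r1 r2 hp
      rw [hpopA]
      by_cases hfK : f ≥ K
      · simp [hfK]
      · simp only [hfK, if_false]
        cases hp2 : popMin r1 r2 with
        | none =>
          obtain ⟨e1, e2⟩ := popMin_none r1 r2 hp2
          subst e1; subst e2
          simp [pyHeappop, PySem.List.min?]
        | some w =>
          obtain ⟨s, t1, t2⟩ := w
          obtain ⟨hpopB, hsmin, ht1, ht2⟩ := popMin_spec r1 r2 hr1 hr2 s t1 t2 hp2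
          rw [hpopB]
          obtain ⟨hct, hbound⟩ := pop2_chain q1 q2 hc f r1 r2 hp s t1 t2 hp2
          have hfs : f ≤ s := by
            have hsm : s ∈ r1 ++ r2 := by
              have hne : r1 ++ r2 ≠ [] := by
                intro hnil
                rcases List.append_eq_nil_iff.mp hnil with ⟨e1, e2⟩
                subst e1; subst e2; simp [popMin] at hp2
              obtain ⟨m', hpop', hmem', _⟩ := pyHeappop_spec (r1 ++ r2) hne
              rw [hpopB] at hpop'
              have he : m' = s := by injection hpop' with h'; injection h' with ha _; exact ha.symm
              exact he ▸ hmem'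
            exact hfmin s hsm
          have hsub : ∀ y ∈ t1 ++ t2, y ∈ r1 ++ r2 := by
            have hss : (r1 ++ r2).erase s ⊆ r1 ++ r2 := List.erase_subset
            have her : (r1 ++ r2).erase s = t1 ++ t2 := by
              obtain ⟨m', hpop', _, _⟩ := pyHeappop_spec (r1 ++ r2) (by
                intro hnil
                rcases List.append_eq_nil_iff.mp hnil with ⟨e1, e2⟩
                subst e1; subst e2; simp [popMin] at hp2)
              rw [hpopB] at hpop'
              injection hpop' with h'
              injection h' with ha hb
              rw [ha, hb]
            rw [her] at hss
            exact fun y hy => hss hy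
          have hsort : (t2 ++ [f + 2 * s]).Pairwise (· ≤ ·) := by
            rw [List.pairwise_append]
            refine ⟨ht2, by simp, ?_⟩
            intro y hy z hz
            rcases List.mem_singleton.mp hz with rfl
            exact hbound y hy
          have hchain : chain t1 (t2 ++ [f + 2 * s]) := by
            refine chain_snoc t1 t2 (f + 2 * s) hct ?_
            intro x hx z hz
            have hxs : s ≤ x := hsmin x hx
            have hzs : s ≤ z := hsmin z hz
            have hfx : f ≤ x := hfmin x (hsub x hx)
            omega
          show solutionAltLoop fuel t1 (t2 ++ [f + 2 * s]) K (ans + 1) =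
              solutionLoop fuel ((t1 ++ t2) ++ [scovilleScore f s]) K (ans + 1)
          rw [ih t1 (t2 ++ [f + 2 * s]) (ans + 1) ht1 hsort hchain,
            show scovilleScore f s = f + 2 * s by unfold scovilleScore; ring,
            List.append_assoc]

-- A's loop depends only on the multiset of pool elements.
theorem solutionLoop_perm (fuel : Nat) (la lb : List Int) (K ans : Int) (hp : la.Perm lb) :
    solutionLoop fuel la K ans = solutionLoop fuel lb K ans := by
  induction fuel generalizing la lb ans with
  | zero => rfl
  | succ fuel ih =>
    simp only [solutionLoop]
    cases la with
    | nil =>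
      have : lb = [] := hp.nil_eq.symm
      subst this; rfl
    | cons a ta =>
      have hnea : (a :: ta) ≠ [] := by simp
      have hneb : lb ≠ [] := by
        intro hnil; subst hnil; exact absurd hp.eq_nil (by simp)
      obtain ⟨ma, hpa, hmema, hmina⟩ := pyHeappop_spec _ hnea
      obtain ⟨mb, hpb, hmemb, hminb⟩ := pyHeappop_spec lb hneb
      have hm : ma = mb :=
        le_antisymm (hmina mb (hp.mem_iff.mpr hmemb)) (hminb ma (hp.mem_iff.mp hmema))
      subst hm
      rw [hpa, hpb]
      have hperm1 : ((a :: ta).erase ma).Perm (lb.erase ma) := hp.erase ma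
      by_cases hK : ma ≥ K
      · simp [hK]
      · simp only [hK, if_false]
        by_cases hra : (a :: ta).erase ma = []
        · have hrb : lb.erase ma = [] := by
            rw [hra] at hperm1; exact hperm1.symm.eq_nil
          rw [hra, hrb]
        · have hneb2 : lb.erase ma ≠ [] := by
            intro hnil; rw [hnil] at hperm1
            exact hra hperm1.eq_nil
          obtain ⟨sa, hpa2, hmema2, hmina2⟩ := pyHeappop_spec _ hra
          obtain ⟨sb, hpb2, hmemb2, hminb2⟩ := pyHeappop_spec _ hneb2
          have hs : sa = sb :=
            le_antisymm (hmina2 sb (hperm1.mem_iff.mpr hmemb2)) (hminb2 sa (hperm1.mem_iff.mp hmema2))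
          subst hs
          rw [hpa2, hpb2]
          exact ih _ _ _ ((hperm1.erase sa).append_right [scovilleScore ma sa])

-- ===== VERDICT (by name: the statement is the Claim_ definition above) =====
theorem solution_spec : Claim_equal_solution := by
  intro scoville K _
  unfold Spec_solution solution solution_alt
  have hsp : (PySem.List.sorted scoville (fun x => x) false).Perm scoville :=
    PySem.List.sorted_perm ..
  have hpw : (PySem.List.sorted scoville (fun x => x) false).Pairwise (· ≤ ·) := by
    have := PySem.List.sorted_pairwise (xs := scoville) (key := fun x => x)
    simpa using this
  rw [altLoop_eq_loop scoville.length _ [] K 0 hpw (by simp) trivial]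
  simpa using (solutionLoop_perm scoville.length scoville _ K 0 hsp.symm)
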